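-- pv_equiv track=rewrite | github.com/RishuJaiz/RishuJaiswal_22080 | question3_ml.py | encode_animals
-- ===== SOURCE A (Python) =====
-- def encode_animals(animals):
--     encoded_values = []
--     label_map = {}
--     current_label = 0
--     for animal in animals:
--         if animal not in label_map:
--             label_map[animal] = current_label
--             current_label += 1
--         encoded_values.append(label_map[animal])
--     return encoded_values
-- ===== SOURCE B (Python) =====
-- def encode_animals(animals):
--     uniques = list(dict.fromkeys(animals))
--     label_map = {animal: label for label, animal in enumerate(uniques)}
--     return [label_map[animal] for animal in animals]
-- ===== Notes on version B (the rewrite author's own statement) =====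
-- stated objective: idiomatic
-- what changed: A's single inline pass that tests membership and assigns labels on the fly is replaced by a build-table-then-map decomposition: first extract the unique animals in first-seen order with dict.fromkeys, then build an index table by enumeration, then map the list through it in a second pass.
import Mathlib
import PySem

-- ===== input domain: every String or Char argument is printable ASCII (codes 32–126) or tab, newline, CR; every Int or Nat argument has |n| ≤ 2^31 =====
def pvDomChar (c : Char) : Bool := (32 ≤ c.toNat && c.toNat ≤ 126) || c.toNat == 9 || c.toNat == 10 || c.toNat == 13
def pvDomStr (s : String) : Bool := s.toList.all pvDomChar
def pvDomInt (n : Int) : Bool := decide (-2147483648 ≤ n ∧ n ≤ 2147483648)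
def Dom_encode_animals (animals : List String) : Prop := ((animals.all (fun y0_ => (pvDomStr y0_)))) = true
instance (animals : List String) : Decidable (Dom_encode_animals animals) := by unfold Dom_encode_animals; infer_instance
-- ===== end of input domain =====

-- B replaces A's single inline labelling pass by an idiomatic build-table-then-map decomposition (dedup, enumerate, lookup); same cost.


-- ===== PORT A =====
-- state: (encoded_values, label_map, current_label); 'label_map[animal]' is ported as getD _ 0,
-- exact here because the key was just inserted / already present (no KeyError is reachable).
def encode_animals (animals : List String) : List Int :=
  (animals.foldl
    (fun (st : List Int × PySem.Dict String Int × Int) animal =>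
      if st.2.1.contains animal = false then
        let lm := st.2.1.insert animal st.2.2
        (st.1 ++ [lm.getD animal 0], lm, st.2.2 + 1)
      else
        (st.1 ++ [st.2.1.getD animal 0], st.2.1, st.2.2))
    ([], PySem.Dict.empty, 0)).1

-- ===== PORT B =====
-- uniques = list(dict.fromkeys(animals)); label_map = {animal: label for label, animal in enumerate(uniques)};
-- [label_map[animal] for animal in animals] — the lookup is getD _ 0, exact since every animal is in uniques.
def encode_animals_alt (animals : List String) : List Int :=
  let uniques := PySem.List.dedup animals
  let label_map := (PySem.List.enumerate uniques).foldl
      (fun (d : PySem.Dict String Int) p => d.insert p.2 p.1) PySem.Dict.empty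
  animals.map (fun animal => label_map.getD animal 0)

-- ===== PRECONDITION & SPEC =====
def Spec_encode_animals (animals : List String) (out : List Int) : Prop := out = encode_animals_alt animals
instance (animals : List String) (out : List Int) : Decidable (Spec_encode_animals animals out) := by unfold Spec_encode_animals; infer_instance

-- ===== CLAIM (what is proved, stated in full; the proofs are below) =====
def Claim_equal_encode_animals : Prop := ∀ (animals : List String), Dom_encode_animals animals → Spec_encode_animals animals (encode_animals animals)

-- ===== LEMMAS AND PROOFS =====

-- the label table B builds from a list of distinct animals
def mkMap (s : List String) : PySem.Dict String Int :=
  (PySem.List.enumerate s).foldl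
    (fun (d : PySem.Dict String Int) p => d.insert p.2 p.1) PySem.Dict.empty

theorem enumerate_append_singleton (s : List String) (x : String) (n : Int) :
    PySem.List.enumerate (s ++ [x]) n
      = PySem.List.enumerate s n ++ [((n + s.length : Int), x)] := by
  induction s generalizing n with
  | nil => simp [PySem.List.enumerate]
  | cons y ys ih =>
      simp only [List.cons_append, PySem.List.enumerate_cons, ih, List.length_cons]
      have hc : n + 1 + (ys.length : Int) = n + ((ys.length + 1 : Nat) : Int) := by
        push_cast; ring
      rw [hc]

theorem mkMap_append (s : List String) (x : String) :
    mkMap (s ++ [x]) = (mkMap s).insert x (s.length : Int) := by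
  unfold mkMap
  rw [enumerate_append_singleton, List.foldl_append]
  simp

theorem getD_foldl_enumerate (l : List String) :
    ∀ (d : PySem.Dict String Int) (n : Int) (a : String), l.Nodup →
    ((PySem.List.enumerate l n).foldl
        (fun (d : PySem.Dict String Int) p => d.insert p.2 p.1) d).getD a 0
      = if a ∈ l then n + (l.idxOf a : Int) else d.getD a 0 := by
  induction l with
  | nil => intro d n a _; simp [PySem.List.enumerate]
  | cons x xs ih =>
      intro d n a h
      rw [PySem.List.enumerate_cons]
      simp only [List.foldl_cons]
      rw [ih _ _ _ (List.Nodup.of_cons h)]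
      by_cases hax : a = x
      · subst hax
        have hna : a ∉ xs := (List.nodup_cons.mp h).1
        simp [hna, PySem.Dict.getD_insert_self]
      · rw [PySem.Dict.getD_insert]
        by_cases hmem : a ∈ xs
        · rw [List.idxOf_cons_ne xs (fun hc => hax hc.symm)]
          simp [hmem, hax]
          ring
        · simp [hmem, hax]

theorem mkMap_getD (s : List String) (a : String) (h : s.Nodup) (ha : a ∈ s) :
    (mkMap s).getD a 0 = (s.idxOf a : Int) := by
  unfold mkMap
  rw [getD_foldl_enumerate _ _ _ _ h]
  simp [ha]

theorem contains_foldl_enumerate (l : List String) (d : PySem.Dict String Int)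
    (n : Int) (a : String) :
    ((PySem.List.enumerate l n).foldl
        (fun (d : PySem.Dict String Int) p => d.insert p.2 p.1) d).contains a
      = (l.contains a || d.contains a) := by
  induction l generalizing d n with
  | nil => simp [PySem.List.enumerate]
  | cons x xs ih =>
      rw [PySem.List.enumerate_cons]
      simp only [List.foldl_cons]
      rw [ih]
      by_cases hax : a = x
      · subst hax; simp
      · have hb : (a == x) = false := beq_false_of_ne hax
        rw [PySem.Dict.contains_insert, hb]
        simp [hax]

theorem mkMap_contains (s : List String) (a : String) :
    (mkMap s).contains a = s.contains a := by
  unfold mkMap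
  rw [contains_foldl_enumerate]
  simp

theorem foldl_add_extend (l s : List String) :
    ∃ t, l.foldl PySem.Set.add s = s ++ t := by
  induction l generalizing s with
  | nil => exact ⟨[], by simp⟩
  | cons x xs ih =>
      simp only [List.foldl_cons]
      by_cases hx : x ∈ s
      · have hadd : PySem.Set.add s x = s := by simp [PySem.Set.add, hx]
        rw [hadd]; exact ih s
      · have hadd : PySem.Set.add s x = s ++ [x] := by simp [PySem.Set.add, hx]
        rw [hadd]
        obtain ⟨t, ht⟩ := ih (s ++ [x])
        exact ⟨x :: t, by simpa using ht⟩


theorem idxOf_foldl_add (l s : List String) (a : String) (ha : a ∈ s) :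
    (l.foldl PySem.Set.add s).idxOf a = s.idxOf a := by
  obtain ⟨t, ht⟩ := foldl_add_extend l s
  rw [ht]
  exact List.idxOf_append_of_mem ha

theorem loopA_eq (l : List String) : ∀ (seen : List String) (enc : List Int),
    seen.Nodup →
    (l.foldl
      (fun (st : List Int × PySem.Dict String Int × Int) animal =>
        if st.2.1.contains animal = false then
          let lm := st.2.1.insert animal st.2.2
          (st.1 ++ [lm.getD animal 0], lm, st.2.2 + 1)
        else
          (st.1 ++ [st.2.1.getD animal 0], st.2.1, st.2.2))
      (enc, mkMap seen, (seen.length : Int))).1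
      = enc ++ l.map (fun a => (((l.foldl PySem.Set.add seen).idxOf a : Nat) : Int)) := by
  induction l with
  | nil => intro seen enc _; simp
  | cons x xs ih =>
      intro seen enc hnd
      simp only [List.foldl_cons, List.map_cons]
      by_cases hx : x ∈ seen
      · have hc : (mkMap seen).contains x = true := by
          rw [mkMap_contains]; simpa using hx
        rw [if_neg (by simp [hc])]
        have hadd : PySem.Set.add seen x = seen := by
          simp [PySem.Set.add, hx]
        have hgd : (mkMap seen).getD x 0 = (seen.idxOf x : Int) :=
          mkMap_getD seen x hnd hx
        rw [ih seen _ hnd, hadd, hgd]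
        rw [idxOf_foldl_add xs seen x hx]
        simp
      · have hc : (mkMap seen).contains x = false := by
          rw [mkMap_contains]; simpa using hx
        rw [if_pos (by simp [hc])]
        have hmk : (mkMap seen).insert x (seen.length : Int) = mkMap (seen ++ [x]) :=
          (mkMap_append seen x).symm
        have hnd' : (seen ++ [x]).Nodup :=
          hnd.append (List.nodup_singleton x) (by simp [List.disjoint_singleton, hx])
        have hlen : ((seen.length : Int) + 1) = ((seen ++ [x]).length : Int) := by
          simp
        simp only [hmk, hlen]
        rw [ih (seen ++ [x]) _ hnd']
        have hadd : PySem.Set.add seen x = seen ++ [x] := by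
          simp [PySem.Set.add, hx]
        have hxm : x ∈ seen ++ [x] := by simp
        have hgd : (mkMap (seen ++ [x])).getD x 0 = ((seen ++ [x]).idxOf x : Int) :=
          mkMap_getD _ x hnd' hxm
        rw [hgd, hadd, idxOf_foldl_add xs (seen ++ [x]) x hxm]
        simp

-- ===== VERDICT (by name: the statement is the Claim_ definition above) =====
theorem encode_animals_spec : Claim_equal_encode_animals := by
  intro animals _
  unfold Spec_encode_animals encode_animals encode_animals_alt
  have hA := loopA_eq animals [] [] (by simp)
  have hmk0 : mkMap ([] : List String) = PySem.Dict.empty := rfl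
  rw [hmk0] at hA
  simp only [List.length_nil, Nat.cast_zero] at hA
  rw [hA]
  have hded : animals.foldl PySem.Set.add [] = PySem.List.dedup animals := rfl
  rw [hded]
  simp only [List.nil_append]
  apply List.map_congr_left
  intro a ha
  have hmem : a ∈ PySem.List.dedup animals := by
    rw [PySem.List.mem_dedup]; exact ha
  exact (mkMap_getD _ a (PySem.List.nodup_dedup animals) hmem).symm
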